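-- pv_equiv track=rewrite | github.com/Jeeeyoungkim/algorithm-study | jeeyoung/Programmers/Lv0/외계어사전.py | solution
-- ===== SOURCE A (Python) =====
-- def solution(spell, dic):
--     spell_num = 0
--
--     for word in dic:
--         visited_spell = spell[:]
--         for char in word:
--             if char in visited_spell:
--                 visited_spell.remove(char)
--         if len(visited_spell) == 0:
--             spell_num += 1
--
--     return 1 if spell_num > 0 else 2
-- ===== SOURCE B (Python) =====
-- def solution(spell, dic):
--     for word in dic:
--         have = {}
--         for ch in word:
--             have[ch] = have.get(ch, 0) + 1
--         if all(have.get(s, 0) >= spell.count(s) for s in spell):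
--             return 1
--     return 2
-- ===== Notes on version B (the rewrite author's own statement) =====
-- stated objective: alternative
-- what changed: Replaces A's per-word destructive copy-and-remove simulation of spell with a per-word character counter compared against spell.count, and replaces A's full count of matching words with an early return on the first match; B never copies or mutates lists.
import Mathlib
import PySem

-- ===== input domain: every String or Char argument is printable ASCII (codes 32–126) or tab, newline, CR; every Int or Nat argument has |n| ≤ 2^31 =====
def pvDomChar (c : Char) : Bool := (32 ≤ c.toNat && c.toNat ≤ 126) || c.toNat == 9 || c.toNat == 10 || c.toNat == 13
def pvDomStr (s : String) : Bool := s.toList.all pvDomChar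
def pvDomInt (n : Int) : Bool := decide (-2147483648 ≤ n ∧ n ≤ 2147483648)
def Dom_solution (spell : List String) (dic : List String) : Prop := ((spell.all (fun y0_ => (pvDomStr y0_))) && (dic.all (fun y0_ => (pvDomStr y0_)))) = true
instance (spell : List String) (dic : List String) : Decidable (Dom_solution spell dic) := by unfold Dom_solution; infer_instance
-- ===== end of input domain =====

-- B replaces A's per-word copy-and-remove simulation by a character counter checked against
-- spell.count, with an early return on the first matching word (same return values; no mutation).

-- ===== PORT A =====
-- inner loop: visited_spell = spell[:]; for char in word: if char in visited_spell: visited_spell.remove(char)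
def solutionVisited (spell : List String) (word : String) : List String :=
  word.toList.foldl (fun vs c =>
    let key := String.ofList [c]
    if vs.contains key then (PySem.List.remove? vs key).getD vs else vs) spell

def solution (spell : List String) (dic : List String) : Int :=
  let spell_num : Int :=
    dic.foldl (fun acc word =>
      if (solutionVisited spell word).length = 0 then acc + 1 else acc) 0
  if spell_num > 0 then 1 else 2

-- ===== PORT B =====
-- have = {}; for ch in word: have[ch] = have.get(ch, 0) + 1
def solutionAltHave (word : String) : PySem.Dict String Int :=
  word.toList.foldl (fun d ch =>
    d.insert (String.ofList [ch]) (d.getD (String.ofList [ch]) 0 + 1)) PySem.Dict.empty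

-- all(have.get(s, 0) >= spell.count(s) for s in spell)
def solutionAltOk (spell : List String) (word : String) : Bool :=
  spell.all (fun s => ((PySem.List.count spell s : Int)) ≤ (solutionAltHave word).getD s 0)

def solution_alt (spell : List String) (dic : List String) : Int :=
  match dic with
  | [] => 2
  | word :: rest => if solutionAltOk spell word then 1 else solution_alt spell rest

-- ===== PRECONDITION & SPEC =====
def Spec_solution (spell : List String) (dic : List String) (out : Int) : Prop := out = solution_alt spell dic
instance (spell : List String) (dic : List String) (out : Int) : Decidable (Spec_solution spell dic out) := by unfold Spec_solution; infer_instance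

-- ===== CLAIM (what is proved, stated in full; the proofs are below) =====
def Claim_equal_solution : Prop := ∀ (spell : List String) (dic : List String), Dom_solution spell dic → Spec_solution spell dic (solution spell dic)

-- ===== LEMMAS AND PROOFS =====

-- one step of A's inner loop is an erase of the first occurrence
theorem pv_step_eq (vs : List String) (c : Char) :
    (if vs.contains (String.ofList [c]) then (PySem.List.remove? vs (String.ofList [c])).getD vs else vs)
      = vs.erase (String.ofList [c]) := by
  by_cases h : String.ofList [c] ∈ vs
  · rw [if_pos (by simpa using h), PySem.List.remove?_eq_some_erase vs _ h]; rfl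
  · rw [if_neg (by simpa using h), List.erase_of_not_mem h]

theorem pv_visited_eq (spell : List String) (word : String) :
    solutionVisited spell word
      = word.toList.foldl (fun vs c => vs.erase (String.ofList [c])) spell := by
  unfold solutionVisited
  congr 1
  funext vs c
  exact pv_step_eq vs c

-- A's inner loop empties the copy of spell iff every string occurs in the word's
-- characters at least as often as in spell
theorem pv_fold_nil_iff : ∀ (ws : List Char) (vs : List String),
    (ws.foldl (fun vs c => vs.erase (String.ofList [c])) vs = []) ↔
      ∀ s : String, List.count s vs ≤ List.count s (ws.map (fun c => String.ofList [c])) := by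
  intro ws
  induction ws with
  | nil =>
    intro vs
    simp only [List.foldl_nil, List.map_nil, List.count_nil, Nat.le_zero]
    constructor
    · rintro rfl s; simp
    · intro h
      cases vs with
      | nil => rfl
      | cons x xs => exact absurd (h x) (by simp [List.count_cons_self])
  | cons c ws ih =>
    intro vs
    rw [List.foldl_cons, ih]
    refine forall_congr' (fun s => ?_)
    rw [List.count_erase]
    simp only [List.map_cons, List.count_cons]
    split_ifs <;> omega

theorem pv_condA_iff (spell : List String) (word : String) :
    ((solutionVisited spell word).length = 0) ↔
      ∀ s : String, List.count s spell ≤ List.count s (word.toList.map (fun c => String.ofList [c])) := by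
  rw [List.length_eq_zero_iff, pv_visited_eq, pv_fold_nil_iff]

theorem pv_have_getD (word : String) (s : String) :
    (solutionAltHave word).getD s 0
      = (List.count s (word.toList.map (fun c => String.ofList [c])) : Int) := by
  have h := PySem.Dict.getD_foldl_insert_add_one
    (word.toList.map (fun c => String.ofList [c])) PySem.Dict.empty s
  rw [List.foldl_map] at h
  rw [PySem.Dict.getD_empty] at h
  unfold solutionAltHave
  rw [h]
  ring

theorem pv_condB_iff (spell : List String) (word : String) :
    (solutionAltOk spell word = true) ↔
      ∀ s ∈ spell, List.count s spell ≤ List.count s (word.toList.map (fun c => String.ofList [c])) := by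
  unfold solutionAltOk
  simp only [List.all_eq_true, pv_have_getD, PySem.List.count_eq, decide_eq_true_eq]
  exact forall₂_congr (fun s _ => by exact_mod_cast Iff.rfl)

theorem pv_cond_iff (spell : List String) (word : String) :
    ((solutionVisited spell word).length = 0) ↔ (solutionAltOk spell word = true) := by
  rw [pv_condA_iff, pv_condB_iff]
  constructor
  · intro h s _; exact h s
  · intro h s
    by_cases hs : s ∈ spell
    · exact h s hs
    · simp [List.count_eq_zero_of_not_mem hs]

theorem pv_A_val (spell : List String) (dic : List String) :
    solution spell dic = if dic.any (solutionAltOk spell) then 1 else 2 := by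
  unfold solution
  rw [PySem.List.foldl_ite_add_one (fun w => (solutionVisited spell w).length = 0) dic 0]
  simp only [zero_add]
  by_cases h : dic.any (solutionAltOk spell) = true
  · rw [if_pos h, if_pos]
    obtain ⟨w, hw, hok⟩ := List.any_eq_true.mp h
    have : 0 < List.countP (fun x => decide ((solutionVisited spell x).length = 0)) dic :=
      List.countP_pos_iff.mpr ⟨w, hw, by simpa using (pv_cond_iff spell w).mpr hok⟩
    exact_mod_cast this
  · rw [if_neg h, if_neg]
    intro hpos
    have : 0 < List.countP (fun x => decide ((solutionVisited spell x).length = 0)) dic := by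
      exact_mod_cast hpos
    obtain ⟨w, hw, hp⟩ := List.countP_pos_iff.mp this
    exact h (List.any_eq_true.mpr ⟨w, hw, (pv_cond_iff spell w).mp (by simpa using hp)⟩)

theorem pv_B_val (spell : List String) (dic : List String) :
    solution_alt spell dic = if dic.any (solutionAltOk spell) then 1 else 2 := by
  induction dic with
  | nil => simp [solution_alt]
  | cons w rest ih =>
    simp only [solution_alt, List.any_cons]
    by_cases h : solutionAltOk spell w
    · simp [h]
    · simp [h, ih]

-- ===== VERDICT (by name: the statement is the Claim_ definition above) =====
theorem solution_spec : Claim_equal_solution := by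
  intro spell dic _
  unfold Spec_solution
  rw [pv_A_val, pv_B_val]
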